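-- pv_equiv track=rewrite | github.com/ksw6895/Brain_alpha_generator | src/brain_agent/agents/validation_loop.py | _retry_order_violation
-- ===== SOURCE A (Python) =====
-- def _first_index(values: list[str], keys: set[str], start: int = 0) -> int:
--     for idx in range(max(0, int(start)), len(values)):
--         if values[idx] in keys:
--             return idx
--     return -1
--
-- def _retry_order_violation(events: list[str]) -> bool:
--     retry_starts = [idx for idx, name in enumerate(events) if name == "validation.retry_started"]
--     for idx in retry_starts:
--         next_retry = _first_index(events, {"validation.retry_started"}, start=idx + 1)
--         end = len(events) if next_retry == -1 else next_retry
--         window = events[idx + 1 : end]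
--         if not any(name in {"validation.retry_failed", "validation.retry_passed"} for name in window):
--             return True
--     return False
-- ===== SOURCE B (Python) =====
-- def _retry_order_violation(events: list[str]) -> bool:
--     pending = False
--     for name in events:
--         if name == "validation.retry_started":
--             if pending:
--                 return True
--             pending = True
--         elif name in ("validation.retry_failed", "validation.retry_passed"):
--             pending = False
--     return pending
-- ===== Notes on version B (the rewrite author's own statement) =====
-- stated objective: simpler
-- what changed: Replaced A's two-phase structure (build the list of retry_started indices, then for each one rescan forward for the next start and slice out the window) by a single streaming pass over the events maintaining one boolean 'pending' flag.
import Mathlib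
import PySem

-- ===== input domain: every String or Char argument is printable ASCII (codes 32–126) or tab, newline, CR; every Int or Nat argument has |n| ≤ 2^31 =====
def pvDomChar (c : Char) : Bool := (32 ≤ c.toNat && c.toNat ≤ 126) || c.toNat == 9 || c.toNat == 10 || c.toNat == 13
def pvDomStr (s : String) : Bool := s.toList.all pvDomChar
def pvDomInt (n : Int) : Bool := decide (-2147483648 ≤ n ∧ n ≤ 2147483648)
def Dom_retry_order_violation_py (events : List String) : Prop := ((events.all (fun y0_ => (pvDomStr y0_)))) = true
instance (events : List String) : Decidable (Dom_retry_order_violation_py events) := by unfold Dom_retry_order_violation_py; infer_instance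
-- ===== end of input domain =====

-- B replaces A's build-index-of-retry-starts-then-rescan-each-window structure by a single
-- streaming pass maintaining one boolean flag (objective: simpler; same return value).

-- ===== PORT A =====
def pvS : String := "validation.retry_started"
def pvF : String := "validation.retry_failed"
def pvP : String := "validation.retry_passed"

-- _first_index's for-loop over range(max(0, start), len(values))
def first_index_go (values : List String) (keys : PySem.Set String) : List Int → Int
  | [] => -1
  | i :: rest =>
    -- values[idx]: idx is drawn from range(0.., len(values)), always in range, so pyGetD is exact here
    if keys.contains (PySem.List.pyGetD values i "") then i else first_index_go values keys rest

def first_index (values : List String) (keys : PySem.Set String) (start : Int) : Int :=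
  first_index_go values keys (PySem.List.pyRange (max 0 start) (values.length : Int))

-- the 'for idx in retry_starts' loop with its early return
def rov_loop (events : List String) : List Int → Bool
  | [] => false
  | idx :: rest =>
    let next_retry := first_index events (PySem.Set.ofList [pvS]) (idx + 1)
    let endd : Int := if next_retry = -1 then (events.length : Int) else next_retry
    let window := PySem.List.slice events (some (idx + 1)) (some endd)
    if !(window.any fun name => (PySem.Set.ofList [pvF, pvP]).contains name) then true
    else rov_loop events rest

def retry_order_violation_py (events : List String) : Bool :=
  rov_loop events (((PySem.List.enumerate events).filter (fun p => p.2 == pvS)).map Prod.fst)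

-- ===== PORT B =====
-- single pass; `pending` = inside a retry window not yet resolved
def rov_go (pending : Bool) : List String → Bool
  | [] => pending
  | name :: rest =>
    if name == pvS then (if pending then true else rov_go true rest)
    else if name == pvF || name == pvP then rov_go false rest
    else rov_go pending rest

def retry_order_violation_py_alt (events : List String) : Bool :=
  rov_go false events

-- ===== PRECONDITION & SPEC =====
def Spec_retry_order_violation_py (events : List String) (out : Bool) : Prop := out = retry_order_violation_py_alt events
instance (events : List String) (out : Bool) : Decidable (Spec_retry_order_violation_py events out) := by unfold Spec_retry_order_violation_py; infer_instance

-- ===== CLAIM (what is proved, stated in full; the proofs are below) =====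
def Claim_equal_retry_order_violation_py : Prop := ∀ (events : List String), Dom_retry_order_violation_py events → Spec_retry_order_violation_py events (retry_order_violation_py events)

-- ===== LEMMAS AND PROOFS =====

-- index of the first "validation.retry_started" in a list, if any
def firstS : List String → Option Nat
  | [] => none
  | e :: t => if e == pvS then some 0 else (firstS t).map (· + 1)

-- "no resolution occurs before the next retry_started (or the end of the list)"
def noRes : List String → Bool
  | [] => true
  | e :: t => if e == pvS then true else if e == pvF || e == pvP then false else noRes t

def startsFrom (xs : List String) (k : Int) : List Int :=
  ((PySem.List.enumerate xs k).filter (fun p => p.2 == pvS)).map Prod.fst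

theorem contS (x : String) : (PySem.Set.ofList [pvS]).contains x = (x == pvS) := by
  by_cases hx : x = pvS <;>
    simp [PySem.Set.ofList, PySem.Set.contains, PySem.Set.add, PySem.Set.empty, hx]

theorem contFP (x : String) :
    (PySem.Set.ofList [pvF, pvP]).contains x = (x == pvF || x == pvP) := by
  have hne : ¬ (pvP = pvF) := by decide
  by_cases h1 : x = pvF <;> by_cases h2 : x = pvP <;>
    simp [PySem.Set.ofList, PySem.Set.contains, PySem.Set.add, PySem.Set.empty, hne, h1, h2]

theorem startsFrom_nil (k : Int) : startsFrom [] k = [] := by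
  simp [startsFrom, PySem.List.enumerate]

theorem startsFrom_cons (e : String) (r : List String) (k : Int) :
    startsFrom (e :: r) k =
      if e == pvS then k :: startsFrom r (k + 1) else startsFrom r (k + 1) := by
  simp only [startsFrom, PySem.List.enumerate]
  split_ifs with h <;> simp [h]

-- rov_go with pending = true: violated unless a resolution precedes the next start
theorem rov_go_true (r : List String) :
    rov_go true r = if noRes r then true else rov_go false r := by
  induction r with
  | nil => simp [rov_go, noRes]
  | cons e t ih =>
    by_cases hs : e == pvS
    · simp [rov_go, noRes, hs]
    · by_cases hfp : e == pvF || e == pvP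
      · simp [rov_go, noRes, hs, hfp]
      · simp [rov_go, noRes, hs, hfp, ih]

-- first_index's scan, started at position k, sees exactly the suffix r
theorem first_index_go_spec (r : List String) : ∀ (vs : List String) (k : Nat),
    vs.length = k + r.length → vs.drop k = r →
    first_index_go vs (PySem.Set.ofList [pvS]) (PySem.List.pyRange (k : Int) (vs.length : Int)) =
      (match firstS r with | none => -1 | some j => ((k + j : Nat) : Int)) := by
  induction r with
  | nil =>
    intro vs k hlen _
    have hkl : (vs.length : Int) = (k : Int) := by simp at hlen; omega
    rw [hkl]
    simp [PySem.List.pyRange, first_index_go, firstS]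
  | cons e t ih =>
    intro vs k hlen hdrop
    simp only [List.length_cons] at hlen
    have hk : (k : Int) < (vs.length : Int) := by omega
    rw [PySem.List.pyRange_one_cons hk]
    have hget : PySem.List.pyGetD vs (k : Int) "" = e := by
      rw [PySem.List.pyGetD_natCast]
      have h1 : vs[k]? = some e := by rw [← List.head?_drop, hdrop]; rfl
      simp [List.getD_eq_getElem?_getD, h1]
    simp only [first_index_go, hget, contS]
    by_cases hs : e = pvS
    · simp [hs, firstS]
    · have hdrop' : vs.drop (k + 1) = t := by
        have := congrArg (List.drop 1) hdrop
        simpa [List.drop_drop, Nat.add_comm] using this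
      have hrec := ih vs (k + 1) (by omega) hdrop'
      rw [show ((k : Int) + 1) = ((k + 1 : Nat) : Int) by push_cast; ring]
      simp only [hs, beq_iff_eq, if_false]
      rw [hrec]
      cases h : firstS t <;> simp [firstS, hs, h]
      · ring_nf

-- the window check of A equals noRes
theorem window_noRes (r : List String) :
    (!( (r.take ((firstS r).getD r.length)).any
        fun name => (PySem.Set.ofList [pvF, pvP]).contains name)) = noRes r := by
  induction r with
  | nil => simp [firstS, noRes]
  | cons e t ih =>
    by_cases hs : e = pvS
    · simp [firstS, noRes, hs]
    · have htake : (e :: t).take ((firstS (e :: t)).getD (e :: t).length) =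
          e :: t.take ((firstS t).getD t.length) := by
        simp only [firstS, hs, beq_iff_eq, if_false]
        cases h : firstS t <;> simp
      rw [htake]
      have hFS : ¬ (pvF = pvS) := by decide
      have hPS : ¬ (pvP = pvS) := by decide
      by_cases h1 : e = pvF
      · simp [noRes, h1, hFS]
      · by_cases h2 : e = pvP
        · simp [noRes, h2, hPS]
        · simp only [List.any_cons, contFP e, Bool.not_or]
          rw [show (e == pvF) = false from by simp [h1],
              show (e == pvP) = false from by simp [h2]]
          simp only [Bool.not_false, Bool.true_and, ih]
          simp [noRes, hs, h1, h2]

-- main generalized lemma: A's loop over the retry starts of the suffix xs of pre ++ xs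
-- computes B's streaming pass over xs
theorem rov_main (xs : List String) : ∀ (pre : List String),
    rov_loop (pre ++ xs) (startsFrom xs (pre.length : Int)) = rov_go false xs := by
  induction xs with
  | nil => intro pre; simp [startsFrom_nil, rov_loop, rov_go]
  | cons e r ih =>
    intro pre
    rw [startsFrom_cons]
    by_cases hs : e == pvS
    · have he : e = pvS := by simpa using hs
      subst he
      simp only [hs, if_true]
      -- one iteration of rov_loop
      have hlen : (pre ++ pvS :: r).length = (pre.length + 1) + r.length := by simp; omega
      have hdropk : (pre ++ pvS :: r).drop (pre.length + 1) = r := by simp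
      have hfi : first_index (pre ++ pvS :: r) (PySem.Set.ofList [pvS]) ((pre.length : Int) + 1)
          = (match firstS r with
             | none => -1
             | some j => (((pre.length + 1) + j : Nat) : Int)) := by
        unfold first_index
        rw [show max 0 ((pre.length : Int) + 1) = ((pre.length + 1 : Nat) : Int) by
          push_cast; omega]
        exact first_index_go_spec r _ (pre.length + 1) hlen hdropk
      simp only [rov_loop, hfi]
      have hrhs : rov_go false (pvS :: r) = rov_go true r := by simp [rov_go]
      rw [hrhs, rov_go_true]
      have hih : rov_loop (pre ++ pvS :: r) (startsFrom r ((pre.length : Int) + 1))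
          = rov_go false r := by
        have := ih (pre ++ [pvS])
        simp only [List.append_assoc, List.singleton_append, List.length_append,
          List.length_cons, List.length_nil] at this
        rw [show ((pre.length : Int) + 1) = (((pre.length + (0 + 1)) : Nat) : Int) by
          push_cast; ring]
        exact this
      cases h : firstS r with
      | none =>
        have hwin : PySem.List.slice (pre ++ pvS :: r) (some ((pre.length : Int) + 1))
            (some (if (-1 : Int) = -1 then ((pre ++ pvS :: r).length : Int) else -1)) = r := by
          rw [if_pos rfl]
          rw [show ((pre.length : Int) + 1) = ((pre.length + 1 : Nat) : Int) by push_cast; ring]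
          rw [hlen, PySem.List.slice_natCast, hdropk]
          simp
        rw [hwin]
        have hcond := window_noRes r
        rw [h] at hcond; simp only [Option.getD_none, List.take_length] at hcond
        rw [hcond]
        by_cases hn : noRes r = true
        · simp [hn]
        · simp [hn, hih]
      | some j =>
        have hne : ¬ ((((pre.length + 1) + j : Nat) : Int) = -1) := by omega
        rw [if_neg hne]
        have hwin : PySem.List.slice (pre ++ pvS :: r) (some ((pre.length : Int) + 1))
            (some (((pre.length + 1) + j : Nat) : Int)) = r.take j := by
          rw [show ((pre.length : Int) + 1) = ((pre.length + 1 : Nat) : Int) by push_cast; ring]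
          rw [PySem.List.slice_natCast, hdropk]
          congr 1
          omega
        rw [hwin]
        have hcond := window_noRes r
        rw [h] at hcond; simp only [Option.getD_some] at hcond
        rw [hcond]
        by_cases hn : noRes r = true
        · simp [hn]
        · simp [hn, hih]
    · simp only [hs, Bool.false_eq_true, if_false]
      have := ih (pre ++ [e])
      simp only [List.append_assoc, List.singleton_append, List.length_append,
        List.length_cons, List.length_nil] at this
      rw [show ((pre.length : Int) + 1) = (((pre.length + (0 + 1)) : Nat) : Int) by
        push_cast; ring]
      rw [this]
      by_cases hfp : e == pvF || e == pvP <;> simp [rov_go, hs, hfp]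

-- ===== VERDICT (by name: the statement is the Claim_ definition above) =====
theorem retry_order_violation_py_spec : Claim_equal_retry_order_violation_py := by
  intro events _
  unfold Spec_retry_order_violation_py retry_order_violation_py retry_order_violation_py_alt
  have := rov_main events []
  simp only [List.nil_append, List.length_nil, Nat.cast_zero, startsFrom] at this
  exact_mod_cast this
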